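-- pv_equiv track=rewrite | github.com/viviable/mopd | analysis/score_teacher_contexts.py | count_total_examples
-- ===== SOURCE A (Python) =====
-- from typing import Any
--
-- def count_total_examples(
--     variants: list[dict[str, Any]],
--     targets_by_prompt: dict[str, list[dict[str, Any]]],
--     max_examples: int | None,
-- ) -> int:
--     total = 0
--     for variant in variants:
--         total += len(targets_by_prompt.get(variant["prompt_id"], []))
--         if max_examples is not None and total >= max_examples:
--             return max_examples
--     return total
-- ===== SOURCE B (Python) =====
-- def count_total_examples(
--     variants,
--     targets_by_prompt,
--     max_examples,
-- ):
--     # group-by: count how many times each prompt_id occurs, then do one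
--     # lookup per DISTINCT prompt_id and weight it by its multiplicity
--     counts = {}
--     for variant in variants:
--         pid = variant["prompt_id"]
--         counts[pid] = counts.get(pid, 0) + 1
--     total = 0
--     for pid, mult in counts.items():
--         total += mult * len(targets_by_prompt.get(pid, []))
--     if max_examples is None:
--         return total
--     return min(total, max_examples)
-- ===== Notes on version B (the rewrite author's own statement) =====
-- stated objective: alternative
-- what changed: Replaces A's single pass with a running total, per-iteration cap test and early return by a group-by algorithm: first build a counter dict of prompt_id multiplicities, then sum multiplicity*len(targets) over the DISTINCT prompt_ids (one dict lookup per distinct id instead of one per variant), and finally clamp once with min; correct because per-variant counts are non-negative so the running total is monotone and the early return equals a final clamp.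
-- outside the precondition, e.g. on count_total_examples([{'prompt_id': 'p'}, {}], {'p': [{}]}, 1): A returns 1, B raises KeyError; on count_total_examples([], {}, -1): A returns 0, B returns -1
import Mathlib
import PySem

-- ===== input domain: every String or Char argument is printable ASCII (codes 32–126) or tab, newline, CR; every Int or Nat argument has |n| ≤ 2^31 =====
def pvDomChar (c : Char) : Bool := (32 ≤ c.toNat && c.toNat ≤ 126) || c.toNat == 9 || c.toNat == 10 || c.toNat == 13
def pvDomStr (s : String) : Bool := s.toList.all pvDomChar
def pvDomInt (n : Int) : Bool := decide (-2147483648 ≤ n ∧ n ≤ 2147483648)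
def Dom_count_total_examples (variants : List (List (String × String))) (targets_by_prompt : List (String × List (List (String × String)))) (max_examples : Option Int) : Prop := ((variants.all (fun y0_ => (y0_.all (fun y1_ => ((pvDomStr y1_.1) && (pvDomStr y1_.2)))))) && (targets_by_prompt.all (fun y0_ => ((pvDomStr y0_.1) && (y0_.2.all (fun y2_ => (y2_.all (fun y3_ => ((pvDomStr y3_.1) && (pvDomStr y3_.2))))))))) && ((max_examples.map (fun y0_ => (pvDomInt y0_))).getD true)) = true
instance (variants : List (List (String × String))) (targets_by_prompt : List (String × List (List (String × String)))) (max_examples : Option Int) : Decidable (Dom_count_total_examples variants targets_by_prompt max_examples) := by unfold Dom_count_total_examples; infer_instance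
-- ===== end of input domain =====

-- B replaces A's one pass with early exit by a group-by: a counter dict of prompt_id
-- multiplicities, then multiplicity*len per DISTINCT id, then one final clamp (objective:
-- alternative decomposition; return values only, no argument is mutated).
-- ===== PORT A =====
-- first-match association-list lookup = Python dict lookup (dicts have unique keys)
def pvALGet (d : List (String × String)) (k : String) : Option String :=
  (d.find? (fun p => p.1 == k)).map (·.2)

def pvTGet (d : List (String × List (List (String × String)))) (k : String) : Option (List (List (String × String))) :=
  (d.find? (fun p => p.1 == k)).map (·.2)

-- the loop of A: running total, early return of max_examples once total >= max_examples
def ctGoA (targets_by_prompt : List (String × List (List (String × String)))) (max_examples : Option Int) : List (List (String × String)) → Int → Int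
  | [], total => total
  | v :: rest, total =>
    match pvALGet v "prompt_id" with
    | none => 0  -- KeyError in Python (excluded by Pre_)
    | some pid =>
      let total' := total + (((pvTGet targets_by_prompt pid).getD []).length : Int)
      match max_examples with
      | some m => if m ≤ total' then m else ctGoA targets_by_prompt max_examples rest total'
      | none => ctGoA targets_by_prompt max_examples rest total'

def count_total_examples (variants : List (List (String × String))) (targets_by_prompt : List (String × List (List (String × String)))) (max_examples : Option Int) : Int :=
  ctGoA targets_by_prompt max_examples variants 0

-- ===== PORT B =====
-- body of B's first loop: counts[pid] = counts.get(pid, 0) + 1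
def pvCountStep (d : PySem.Dict String Int) (v : List (String × String)) : PySem.Dict String Int :=
  match pvALGet v "prompt_id" with
  | none => d  -- KeyError in Python (excluded by Pre_)
  | some pid => d.insert pid (d.getD pid 0 + 1)

def count_total_examples_alt (variants : List (List (String × String))) (targets_by_prompt : List (String × List (List (String × String)))) (max_examples : Option Int) : Int :=
  -- first loop: counter dict of prompt_id multiplicities
  let counts : PySem.Dict String Int := variants.foldl pvCountStep PySem.Dict.empty
  -- second loop: one targets lookup per distinct prompt_id, weighted by multiplicity
  let total : Int := counts.items.foldl (fun acc p =>
    acc + p.2 * (((pvTGet targets_by_prompt p.1).getD []).length : Int)) 0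
  match max_examples with
  | none => total
  | some m => min total m

-- ===== PRECONDITION & SPEC =====
-- Pre_ excludes (i) inputs where some variant lacks the "prompt_id" key — there A either raises
-- KeyError or returns only via an accidental early exit while B's counter pass raises — and
-- (ii) the corner of an empty variants list with a negative cap, where A's 0 and B's cap are
-- both defensible values for a nonsensical negative max_examples.
def Pre_count_total_examples (variants : List (List (String × String))) (targets_by_prompt : List (String × List (List (String × String)))) (max_examples : Option Int) : Prop :=
  (∀ v ∈ variants, (pvALGet v "prompt_id").isSome = true) ∧
  (variants = [] → 0 ≤ max_examples.getD 0)
instance (variants : List (List (String × String))) (targets_by_prompt : List (String × List (List (String × String)))) (max_examples : Option Int) : Decidable (Pre_count_total_examples variants targets_by_prompt max_examples) := by unfold Pre_count_total_examples; infer_instance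

def pvWitness_count_total_examples : (List (List (String × String))) × (List (String × List (List (String × String)))) × Option Int :=
  ([[("prompt_id", "p")]], [("p", [[]])], some 1)

def Spec_count_total_examples (variants : List (List (String × String))) (targets_by_prompt : List (String × List (List (String × String)))) (max_examples : Option Int) (out : Int) : Prop := out = count_total_examples_alt variants targets_by_prompt max_examples
instance (variants : List (List (String × String))) (targets_by_prompt : List (String × List (List (String × String)))) (max_examples : Option Int) (out : Int) : Decidable (Spec_count_total_examples variants targets_by_prompt max_examples out) := by unfold Spec_count_total_examples; infer_instance

-- ===== CLAIM =====
def Claim_equal_count_total_examples : Prop := ∀ (variants : List (List (String × String))) (targets_by_prompt : List (String × List (List (String × String)))) (max_examples : Option Int), Dom_count_total_examples variants targets_by_prompt max_examples → Pre_count_total_examples variants targets_by_prompt max_examples → Spec_count_total_examples variants targets_by_prompt max_examples (count_total_examples variants targets_by_prompt max_examples)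

-- ===== LEMMAS AND PROOFS =====

-- the prompt_id of a variant, defaulted (Pre_ guarantees some)
def pvPid (v : List (String × String)) : String := (pvALGet v "prompt_id").getD ""

-- the per-prompt_id count
def pvF (t : List (String × List (List (String × String)))) (pid : String) : Int :=
  (((pvTGet t pid).getD []).length : Int)

-- the per-variant count (some pid guaranteed by Pre_)
def pvLen (t : List (String × List (List (String × String)))) (v : List (String × String)) : Int :=
  match pvALGet v "prompt_id" with
  | none => 0
  | some pid => pvF t pid

theorem pvLen_nonneg (t : List (String × List (List (String × String)))) (v : List (String × String)) :
    0 ≤ pvLen t v := by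
  unfold pvLen pvF; cases pvALGet v "prompt_id" <;> simp

def pvSum (t : List (String × List (List (String × String)))) : List (List (String × String)) → Int
  | [] => 0
  | v :: rest => pvLen t v + pvSum t rest

theorem pvSum_nonneg (t : List (String × List (List (String × String)))) (vs : List (List (String × String))) :
    0 ≤ pvSum t vs := by
  induction vs with
  | nil => simp [pvSum]
  | cons v rest ih => simp only [pvSum]; have := pvLen_nonneg t v; omega

-- ---- A-side characterisation ----
theorem ctGoA_none (t : List (String × List (List (String × String)))) (vs : List (List (String × String))) (acc : Int)
    (hk : ∀ v ∈ vs, (pvALGet v "prompt_id").isSome = true) :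
    ctGoA t none vs acc = acc + pvSum t vs := by
  induction vs generalizing acc with
  | nil => simp [ctGoA, pvSum]
  | cons v rest ih =>
    have hv := hk v (by simp)
    obtain ⟨pid, hpid⟩ := Option.isSome_iff_exists.mp hv
    simp only [ctGoA, hpid, pvSum]
    rw [ih _ (fun w hw => hk w (by simp [hw]))]
    simp only [pvLen, pvF, hpid]; ring

theorem ctGoA_some (t : List (String × List (List (String × String)))) (m : Int) (vs : List (List (String × String))) (acc : Int)
    (hne : vs ≠ []) (hk : ∀ v ∈ vs, (pvALGet v "prompt_id").isSome = true) :
    ctGoA t (some m) vs acc = min (acc + pvSum t vs) m := by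
  induction vs generalizing acc with
  | nil => exact absurd rfl hne
  | cons v rest ih =>
    have hv := hk v (by simp)
    obtain ⟨pid, hpid⟩ := Option.isSome_iff_exists.mp hv
    have hlen : pvLen t v = pvF t pid := by simp [pvLen, hpid]
    simp only [ctGoA, hpid]
    split_ifs with h
    · have hr := pvSum_nonneg t rest
      have : m ≤ acc + pvSum t (v :: rest) := by
        simp only [pvSum]; rw [hlen] at *; simp only [pvF] at *; omega
      omega
    · cases rest with
      | nil => simp [ctGoA, pvSum, hlen, pvF] at *; omega
      | cons w ws =>
        rw [ih _ (by simp) (fun u hu => hk u (by simp at hu ⊢; tauto))]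
        simp only [pvSum]; rw [hlen]; congr 1; simp only [pvF]; ring

-- ---- B-side characterisation ----

-- the counter loop over variants is the counter of the mapped prompt_ids (under Pre_)
theorem counts_eq_counter (vs : List (List (String × String))) (d : PySem.Dict String Int)
    (hk : ∀ v ∈ vs, (pvALGet v "prompt_id").isSome = true) :
    vs.foldl pvCountStep d
    = (vs.map pvPid).foldl (fun d x => d.insert x (d.getD x 0 + 1)) d := by
  induction vs generalizing d with
  | nil => rfl
  | cons v rest ih =>
    obtain ⟨pid, hpid⟩ := Option.isSome_iff_exists.mp (hk v (by simp))
    simp only [List.foldl, List.map, pvCountStep, hpid, pvPid, Option.getD_some]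
    exact ih _ (fun w hw => hk w (by simp [hw]))

-- summing an ite-single term over a Nodup list containing x picks out g x
theorem sum_map_ite_single {α : Type} [DecidableEq α] (g : α → Int) (x : α) (L : List α)
    (hnd : L.Nodup) (hx : x ∈ L) :
    (L.map (fun k => if k = x then g k else 0)).sum = g x := by
  induction L with
  | nil => cases hx
  | cons a L ih =>
    rcases List.mem_cons.mp hx with h | h
    · have hnotmem : x ∉ L := h ▸ (List.nodup_cons.mp hnd).1
      have hz : (L.map (fun k => if k = x then g k else 0)) = L.map (fun _ => 0) := by
        apply List.map_congr_left
        intro k hkL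
        have : k ≠ x := fun he => hnotmem (he ▸ hkL)
        simp [this]
      simp [← h, hz]
    · have hne : a ≠ x := fun he => (List.nodup_cons.mp hnd).1 (he ▸ h)
      simp only [List.map, List.sum_cons, if_neg hne, ih (List.nodup_cons.mp hnd).2 h, zero_add]

-- grouping: summing count(k)*f(k) over a Nodup superset of xs equals summing f over xs
theorem grouped_sum (f : String → Int) (xs L : List String)
    (hnd : L.Nodup) (hsub : ∀ k ∈ xs, k ∈ L) :
    (L.map (fun k => ((xs.count k : Int)) * f k)).sum = (xs.map f).sum := by
  induction xs with
  | nil => simp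
  | cons x rest ih =>
    have hstep : (L.map (fun k => ((((x :: rest).count k : Nat) : Int)) * f k))
        = L.map (fun k => ((rest.count k : Int)) * f k + (if k = x then f k else 0)) := by
      apply List.map_congr_left
      intro k _
      rw [List.count_cons]
      by_cases h : k = x
      · subst h; simp; ring
      · simp only [beq_iff_eq]
        rw [if_neg (fun he : x = k => h he.symm), if_neg h]
        push_cast; ring
    rw [hstep, PySem.List.sum_map_add_int,
        ih (fun k hk => hsub k (by simp [hk])),
        sum_map_ite_single f x L hnd (hsub x (by simp))]
    simp only [List.map, List.sum_cons]; ring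

-- summing f over the mapped prompt_ids is pvSum (under Pre_)
theorem map_pid_sum (t : List (String × List (List (String × String)))) (vs : List (List (String × String)))
    (hk : ∀ v ∈ vs, (pvALGet v "prompt_id").isSome = true) :
    ((vs.map pvPid).map (pvF t)).sum = pvSum t vs := by
  induction vs with
  | nil => simp [pvSum]
  | cons v rest ih =>
    obtain ⟨pid, hpid⟩ := Option.isSome_iff_exists.mp (hk v (by simp))
    simp only [List.map, List.sum_cons, pvSum, pvPid, pvLen, pvF, hpid, Option.getD_some,
      ih (fun w hw => hk w (by simp [hw]))]

-- B's total equals pvSum (under Pre_)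
theorem alt_total_eq (t : List (String × List (List (String × String)))) (vs : List (List (String × String)))
    (hk : ∀ v ∈ vs, (pvALGet v "prompt_id").isSome = true) :
    ((vs.foldl pvCountStep PySem.Dict.empty).items.foldl
      (fun acc p => acc + p.2 * pvF t p.1) 0)
    = pvSum t vs := by
  rw [counts_eq_counter vs PySem.Dict.empty hk,
      PySem.Dict.foldl_insert_getD_add_one_eq_counter,
      PySem.List.foldl_add, PySem.Dict.items_counter]
  rw [List.map_map]
  have hcomp : ((PySem.Set.ofList (vs.map pvPid)).map
      ((fun p : String × Int => p.2 * pvF t p.1) ∘ fun k => (k, ((vs.map pvPid).count k : Int)))).sum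
      = ((PySem.Set.ofList (vs.map pvPid)).map (fun k => (((vs.map pvPid).count k : Int)) * pvF t k)).sum := by
    rfl
  rw [hcomp, grouped_sum (pvF t) (vs.map pvPid) _ (PySem.Set.nodup_ofList _)
      (fun k hk' => (PySem.Set.mem_ofList _ _).mpr hk'), map_pid_sum t vs hk]
  omega

-- ===== VERDICT =====
theorem count_total_examples_spec : Claim_equal_count_total_examples := by
  intro variants targets_by_prompt max_examples _ hpre
  obtain ⟨hk, hemp⟩ := hpre
  have htot := alt_total_eq targets_by_prompt variants hk
  simp only [pvF] at htot
  unfold Spec_count_total_examples count_total_examples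
  cases max_examples with
  | none =>
    simp only [count_total_examples_alt, htot]
    rw [ctGoA_none _ _ _ hk]; ring
  | some m =>
    simp only [count_total_examples_alt, htot]
    cases variants with
    | nil =>
      have h0 : (0 : Int) ≤ m := by simpa using hemp rfl
      simp [ctGoA, pvSum]
      omega
    | cons v rest =>
      rw [ctGoA_some _ _ _ _ (by simp) hk]
      omega
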